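-- pv_equiv track=rewrite | github.com/s7evinkelevra/MHC_Evolution | PyScripts/packed_plots_of_MHC_alleles.py | lookForVARinList
-- ===== SOURCE A (Python) =====
-- def lookForVARinList(templateList):
--     """Checks which parameters are designated to be investigated as independent
--     variables. Gets their index in the list of template parameter description.
--     The list can be genarated with `loadParamSettings(templateFile)`."""
--     varsList = {"VAR": 0, "VARX": 0, "IRR": 0}
--     for ii, itm in enumerate(templateList):
--         if(itm == "VAR"):
--             varsList["VAR"] = ii
--         elif(itm == "VARX"):
--             varsList["VARX"] = ii
--         elif(itm == "IRR"):
--             varsList["IRR"] = ii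
--         else:
--             pass
--     return varsList
-- ===== SOURCE B (Python) =====
-- def lookForVARinList(templateList):
--     return {key: max((i for i, itm in enumerate(templateList) if itm == key),
--                      default=0)
--             for key in ("VAR", "VARX", "IRR")}
-- ===== Notes on version B (the rewrite author's own statement) =====
-- stated objective: idiomatic
-- what changed: Replaces the single branching pass that mutates a dict with a dict comprehension doing one independent last-occurrence scan per fixed key via max(..., default=0).
import Mathlib
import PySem

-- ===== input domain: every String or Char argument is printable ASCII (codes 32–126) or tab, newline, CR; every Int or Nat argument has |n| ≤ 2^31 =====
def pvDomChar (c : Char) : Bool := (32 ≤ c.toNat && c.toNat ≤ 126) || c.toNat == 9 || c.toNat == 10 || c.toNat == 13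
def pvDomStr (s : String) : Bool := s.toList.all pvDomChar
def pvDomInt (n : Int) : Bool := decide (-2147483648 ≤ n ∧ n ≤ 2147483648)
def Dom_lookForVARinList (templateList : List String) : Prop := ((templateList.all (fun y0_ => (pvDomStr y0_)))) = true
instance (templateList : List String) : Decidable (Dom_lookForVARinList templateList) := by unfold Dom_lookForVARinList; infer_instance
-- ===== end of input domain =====

-- B replaces A's single branching pass over an in-place dict with one independent
-- last-occurrence scan (max of matching indices, default 0) per fixed key: idiomatic, same cost.

-- ===== PORT A =====
-- the loop body of A: the if/elif/elif/else chain updating varsList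
def pvStepA (d : PySem.Dict String Int) (p : Int × String) : PySem.Dict String Int :=
  if p.2 == "VAR" then d.insert "VAR" p.1
  else if p.2 == "VARX" then d.insert "VARX" p.1
  else if p.2 == "IRR" then d.insert "IRR" p.1
  else d

def lookForVARinList (templateList : List String) : List (String × Int) :=
  let varsList : PySem.Dict String Int := PySem.Dict.ofList [("VAR", 0), ("VARX", 0), ("IRR", 0)]
  ((PySem.List.enumerate templateList).foldl pvStepA varsList).items

-- ===== PORT B =====
-- max((i for i, itm in enumerate(templateList) if itm == key), default=0)
def pvLastIdx (templateList : List String) (key : String) : Int :=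
  PySem.List.maxD (((PySem.List.enumerate templateList).filter (fun p => p.2 == key)).map (·.1))
    (fun x => x) 0

def lookForVARinList_alt (templateList : List String) : List (String × Int) :=
  [("VAR", pvLastIdx templateList "VAR"),
   ("VARX", pvLastIdx templateList "VARX"),
   ("IRR", pvLastIdx templateList "IRR")]

-- ===== PRECONDITION & SPEC =====
def Spec_lookForVARinList (templateList : List String) (out : List (String × Int)) : Prop := out = lookForVARinList_alt templateList
instance (templateList : List String) (out : List (String × Int)) : Decidable (Spec_lookForVARinList templateList out) := by unfold Spec_lookForVARinList; infer_instance

-- ===== CLAIM (what is proved, stated in full; the proofs are below) =====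
def Claim_equal_lookForVARinList : Prop := ∀ (templateList : List String), Dom_lookForVARinList templateList → Spec_lookForVARinList templateList (lookForVARinList templateList)

-- ===== LEMMAS AND PROOFS =====

-- last matching index kept by a forward pass (the common characterisation of both sides)
def pvLastD (key : String) (t : List String) (s d : Int) : Int :=
  (PySem.List.enumerate t s).foldl (fun acc p => if p.2 == key then p.1 else acc) d

theorem pvEnum_fst_ge (t : List String) : ∀ (s : Int), ∀ p ∈ PySem.List.enumerate t s, s ≤ p.1 := by
  induction t with
  | nil => intro s p hp; simp [PySem.List.enumerate] at hp
  | cons x xs ih =>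
    intro s p hp
    rw [PySem.List.enumerate_cons] at hp
    rcases List.mem_cons.1 hp with h | h
    · simp [h]
    · have := ih (s + 1) p h; omega

-- A's fold over the three-key dict keeps its shape, each value being the running last index
theorem pvFoldA (t : List String) : ∀ (s a b c : Int),
    (PySem.List.enumerate t s).foldl pvStepA (PySem.Dict.mk [("VAR", a), ("VARX", b), ("IRR", c)])
      = PySem.Dict.mk [("VAR", pvLastD "VAR" t s a), ("VARX", pvLastD "VARX" t s b),
                       ("IRR", pvLastD "IRR" t s c)] := by
  induction t with
  | nil => intro s a b c; simp [PySem.List.enumerate, pvLastD]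
  | cons x xs ih =>
    intro s a b c
    rw [PySem.List.enumerate_cons]
    simp only [List.foldl_cons, pvLastD, PySem.List.enumerate_cons]
    by_cases h1 : x = "VAR"
    · simp [pvStepA, h1, PySem.Dict.insert, PySem.Dict.contains, ih, pvLastD]
    · by_cases h2 : x = "VARX"
      · simp [pvStepA, h2, PySem.Dict.insert, PySem.Dict.contains, ih, pvLastD]
      · by_cases h3 : x = "IRR"
        · simp [pvStepA, h3, PySem.Dict.insert, PySem.Dict.contains, ih, pvLastD]
        · simp [pvStepA, h1, h2, h3, ih, pvLastD]

-- the step of Python's max() as PySem.List.max? folds it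
def pvStep (acc : Option Int) (x : Int) : Option Int :=
  match acc with
  | none => some x
  | some m => if m < x then some x else some m

theorem pvMax?_eq_foldl (xs : List Int) :
    PySem.List.max? xs (fun x => x) = xs.foldl pvStep none := by
  unfold PySem.List.max?
  congr 1
  funext acc x
  cases acc <;> rfl

-- B's running-max fold over the filtered indices, started at a lower bound, keeps the last index
theorem pvMaxChain (key : String) (t : List String) : ∀ (s d : Int),
    (∀ p ∈ PySem.List.enumerate t s, d ≤ p.1) →
    (((PySem.List.enumerate t s).filter (fun p => p.2 == key)).map (·.1)).foldl pvStep (some d)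
      = some (pvLastD key t s d) := by
  induction t with
  | nil => intro s d _; simp [PySem.List.enumerate, pvLastD]
  | cons x xs ih =>
    intro s d hd
    have hs : d ≤ s := hd (s, x) (by rw [PySem.List.enumerate_cons]; exact List.mem_cons_self)
    have htail : ∀ p ∈ PySem.List.enumerate xs (s + 1), s ≤ p.1 := by
      intro p hp; have := pvEnum_fst_ge xs (s + 1) p hp; omega
    rw [PySem.List.enumerate_cons]
    simp only [pvLastD, PySem.List.enumerate_cons, List.foldl_cons]
    by_cases hk : x == key
    · have hmax : (if d < s then some s else some d) = some s := by
        split <;> [rfl; exact congrArg some (by omega)]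
      simp only [hk, List.filter_cons_of_pos, List.map_cons, List.foldl_cons, if_pos, pvStep, hmax]
      exact ih (s + 1) s htail
    · have hk' : (x == key) = false := beq_eq_false_iff_ne.mpr (by simpa using hk)
      rw [List.filter_cons_of_neg (by simp [hk'])]
      simp only [hk', Bool.false_eq_true, if_false]
      exact ih (s + 1) d (fun p hp => le_trans hs (htail p hp))

theorem pvNoneStart (xs : List Int) (h : ∀ x ∈ xs, 0 ≤ x) :
    (xs.foldl pvStep none).getD 0 = (xs.foldl pvStep (some 0)).getD 0 := by
  cases xs with
  | nil => rfl
  | cons y ys =>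
    have hy : 0 ≤ y := h y List.mem_cons_self
    simp only [List.foldl_cons]
    have : pvStep (some 0) y = pvStep none y := by
      simp only [pvStep]
      split <;> [rfl; exact congrArg some (by omega)]
    rw [this]

theorem pvLastIdx_eq (t : List String) (key : String) :
    pvLastIdx t key = pvLastD key t 0 0 := by
  have hnn : ∀ x ∈ ((PySem.List.enumerate t).filter (fun p => p.2 == key)).map (·.1), (0 : Int) ≤ x := by
    intro x hx
    rcases List.mem_map.1 hx with ⟨p, hp, rfl⟩
    exact pvEnum_fst_ge t 0 p (List.mem_of_mem_filter hp)
  have hch := pvMaxChain key t 0 0 (fun p hp => pvEnum_fst_ge t 0 p hp)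
  unfold pvLastIdx PySem.List.maxD
  rw [pvMax?_eq_foldl, pvNoneStart _ hnn, hch]
  rfl

-- ===== VERDICT (by name: the statement is the Claim_ definition above) =====
theorem lookForVARinList_spec : Claim_equal_lookForVARinList := by
  intro t _
  unfold Spec_lookForVARinList lookForVARinList lookForVARinList_alt
  have h0 : (PySem.Dict.ofList [("VAR", (0:Int)), ("VARX", 0), ("IRR", 0)])
      = PySem.Dict.mk [("VAR", 0), ("VARX", 0), ("IRR", 0)] := by decide
  rw [h0]
  show ((PySem.List.enumerate t).foldl pvStepA (PySem.Dict.mk [("VAR", 0), ("VARX", 0), ("IRR", 0)])).items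
      = [("VAR", pvLastIdx t "VAR"), ("VARX", pvLastIdx t "VARX"), ("IRR", pvLastIdx t "IRR")]
  rw [pvFoldA t 0 0 0 0]
  simp [pvLastIdx_eq]
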